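-- pv_equiv track=rewrite | github.com/hades/aoc23 | aoc23/day13.py | is_mirrored_x
-- ===== SOURCE A (Python) =====
-- def is_mirrored_x(pattern: set[tuple[int, int]], max_x: int, max_y: int,
--                   x_mirror: int, desired_errors: int = 0) -> bool:
--   min_x = max(0, 2 * x_mirror - max_x)
--   max_x = min(max_x, 2 * x_mirror)
--   errors = 0
--   for y in range(max_y):
--     for x in range(min_x, x_mirror):
--       mirrored = 2 * x_mirror - x - 1
--       if (x, y) in pattern and (mirrored, y) not in pattern:
--         errors += 1
--       if (x, y) not in pattern and (mirrored, y) in pattern: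
--         errors += 1
--       if errors > desired_errors:
--         return False
--   return errors == desired_errors
-- ===== SOURCE B (Python) =====
-- def is_mirrored_x(pattern, max_x, max_y, x_mirror, desired_errors=0):
--   # Iterate over the points themselves instead of scanning the grid:
--   # a mismatch pair corresponds to exactly one occupied cell in the mirror band
--   # whose mirror cell is unoccupied.
--   min_x = max(0, 2 * x_mirror - max_x)
--   hi = 2 * x_mirror - min_x
--   errors = 0
--   for x, y in set(pattern):
--     if 0 <= y < max_y and min_x <= x < hi and (2 * x_mirror - x - 1, y) not in pattern:
--       errors += 1
--   return errors == desired_errors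
-- ===== Notes on version B (the rewrite author's own statement) =====
-- stated objective: faster
-- what changed: B iterates once over the pattern's points (counting occupied cells in the mirror band whose mirror cell is unoccupied) instead of scanning every (y, x) grid cell with an early exit, and returns errors == desired_errors directly.
import Mathlib
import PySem

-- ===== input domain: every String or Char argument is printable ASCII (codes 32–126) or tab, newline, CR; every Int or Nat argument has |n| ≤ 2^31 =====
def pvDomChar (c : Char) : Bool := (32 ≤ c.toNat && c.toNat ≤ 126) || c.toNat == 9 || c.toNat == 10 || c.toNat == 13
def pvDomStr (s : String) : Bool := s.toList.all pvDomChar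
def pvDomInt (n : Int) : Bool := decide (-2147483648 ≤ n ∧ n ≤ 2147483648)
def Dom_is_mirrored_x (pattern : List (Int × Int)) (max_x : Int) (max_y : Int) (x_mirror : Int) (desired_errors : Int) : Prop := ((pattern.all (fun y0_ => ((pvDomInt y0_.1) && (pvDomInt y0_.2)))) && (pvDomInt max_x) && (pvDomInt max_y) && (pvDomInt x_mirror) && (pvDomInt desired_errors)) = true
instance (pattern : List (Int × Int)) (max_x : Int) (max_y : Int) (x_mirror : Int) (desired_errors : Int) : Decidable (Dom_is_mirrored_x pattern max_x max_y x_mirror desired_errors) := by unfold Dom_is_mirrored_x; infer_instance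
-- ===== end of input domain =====

-- B iterates over the points of the pattern (one membership test per point) instead of
-- scanning the whole y×x grid with an early exit; same return value for every input.

-- ===== PORT A =====
-- inner loop: for x in range(min_x, x_mirror), with the early 'return False' as none
def pvInnerA (pattern : List (Int × Int)) (x_mirror desired_errors y : Int) :
    List Int → Int → Option Int
  | [], errors => some errors
  | x :: xs, errors =>
    let mirrored := 2 * x_mirror - x - 1
    let e1 := if pattern.contains (x, y) && !pattern.contains (mirrored, y) then errors + 1 else errors
    let e2 := if !pattern.contains (x, y) && pattern.contains (mirrored, y) then e1 + 1 else e1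
    if e2 > desired_errors then none
    else pvInnerA pattern x_mirror desired_errors y xs e2

-- outer loop: for y in range(max_y)
def pvOuterA (pattern : List (Int × Int)) (x_mirror desired_errors : Int) (xr : List Int) :
    List Int → Int → Option Int
  | [], errors => some errors
  | y :: ys, errors =>
    match pvInnerA pattern x_mirror desired_errors y xr errors with
    | none => none
    | some e => pvOuterA pattern x_mirror desired_errors xr ys e

def is_mirrored_x (pattern : List (Int × Int)) (max_x : Int) (max_y : Int) (x_mirror : Int) (desired_errors : Int) : Bool :=
  let min_x := max 0 (2 * x_mirror - max_x)
  let _max_x' := min max_x (2 * x_mirror)  -- Python rebinds max_x; the value is never used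
  match pvOuterA pattern x_mirror desired_errors
      (PySem.List.pyRange min_x x_mirror 1) (PySem.List.pyRange 0 max_y 1) 0 with
  | none => false
  | some errors => errors == desired_errors

-- ===== PORT B =====
def is_mirrored_x_alt (pattern : List (Int × Int)) (max_x : Int) (max_y : Int) (x_mirror : Int) (desired_errors : Int) : Bool :=
  let min_x := max 0 (2 * x_mirror - max_x)
  let hi := 2 * x_mirror - min_x
  let errors := (PySem.Set.ofList pattern).foldl
    (fun errors p =>
      if decide (0 ≤ p.2) && decide (p.2 < max_y) && decide (min_x ≤ p.1) && decide (p.1 < hi)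
          && !pattern.contains (2 * x_mirror - p.1 - 1, p.2)
      then errors + 1 else errors) (0 : Int)
  errors == desired_errors

-- ===== PRECONDITION & SPEC =====
def Spec_is_mirrored_x (pattern : List (Int × Int)) (max_x : Int) (max_y : Int) (x_mirror : Int) (desired_errors : Int) (out : Bool) : Prop := out = is_mirrored_x_alt pattern max_x max_y x_mirror desired_errors
instance (pattern : List (Int × Int)) (max_x : Int) (max_y : Int) (x_mirror : Int) (desired_errors : Int) (out : Bool) : Decidable (Spec_is_mirrored_x pattern max_x max_y x_mirror desired_errors out) := by unfold Spec_is_mirrored_x; infer_instance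

-- ===== CLAIM (what is proved, stated in full; the proofs are below) =====
def Claim_equal_is_mirrored_x : Prop := ∀ (pattern : List (Int × Int)) (max_x : Int) (max_y : Int) (x_mirror : Int) (desired_errors : Int), Dom_is_mirrored_x pattern max_x max_y x_mirror desired_errors → Spec_is_mirrored_x pattern max_x max_y x_mirror desired_errors (is_mirrored_x pattern max_x max_y x_mirror desired_errors)

-- ===== LEMMAS AND PROOFS =====

-- contribution of one grid cell (x, y) of the left half, as A counts it
def pvC (pattern : List (Int × Int)) (x_mirror y x : Int) : Int :=
  (if pattern.contains (x, y) && !pattern.contains (2 * x_mirror - x - 1, y) then 1 else 0)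
  + (if !pattern.contains (x, y) && pattern.contains (2 * x_mirror - x - 1, y) then 1 else 0)

def pvRow (pattern : List (Int × Int)) (x_mirror a b y : Int) : Int :=
  ((PySem.List.pyRange a b 1).map (pvC pattern x_mirror y)).sum

def pvTot (pattern : List (Int × Int)) (x_mirror a b my : Int) : Int :=
  ((PySem.List.pyRange 0 my 1).map (pvRow pattern x_mirror a b)).sum

lemma pvC_nonneg (pattern : List (Int × Int)) (x_mirror y x : Int) : 0 ≤ pvC pattern x_mirror y x := by
  unfold pvC; split_ifs <;> omega

lemma pvRow_nonneg (pattern : List (Int × Int)) (x_mirror a b y : Int) : 0 ≤ pvRow pattern x_mirror a b y := by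
  unfold pvRow
  refine List.sum_nonneg ?_
  intro z hz
  obtain ⟨x, _, rfl⟩ := List.mem_map.1 hz
  exact pvC_nonneg _ _ _ _

lemma pvInnerA_eq (pattern : List (Int × Int)) (xm d y : Int) :
    ∀ (xs : List Int) (errors : Int),
      pvInnerA pattern xm d y xs errors
        = if xs ≠ [] ∧ errors + ((xs.map (pvC pattern xm y)).sum) > d then none
          else some (errors + (xs.map (pvC pattern xm y)).sum) := by
  intro xs
  induction xs with
  | nil => intro errors; simp [pvInnerA]
  | cons x xs ih =>
    intro errors
    have hsumnn : 0 ≤ (xs.map (pvC pattern xm y)).sum := by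
      refine List.sum_nonneg ?_
      intro z hz
      obtain ⟨x', _, rfl⟩ := List.mem_map.1 hz
      exact pvC_nonneg _ _ _ _
    have hstep : (if !pattern.contains (x, y) && pattern.contains (2 * xm - x - 1, y)
        then (if pattern.contains (x, y) && !pattern.contains (2 * xm - x - 1, y) then errors + 1 else errors) + 1
        else (if pattern.contains (x, y) && !pattern.contains (2 * xm - x - 1, y) then errors + 1 else errors))
        = errors + pvC pattern xm y x := by
      cases h1 : pattern.contains (x, y) <;> cases h2 : pattern.contains (2 * xm - x - 1, y) <;>
        simp only [pvC, h1, h2] <;> simp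
    simp only [pvInnerA]
    rw [hstep]
    have hcnn : 0 ≤ pvC pattern xm y x := pvC_nonneg _ _ _ _
    by_cases hgt : errors + pvC pattern xm y x > d
    · have : x :: xs ≠ [] ∧ errors + ((x :: xs).map (pvC pattern xm y)).sum > d := by
        refine ⟨by simp, ?_⟩
        simp only [List.map_cons, List.sum_cons]
        omega
      rw [if_pos hgt, if_pos this]
    · rw [if_neg hgt, ih]
      by_cases hxs : xs = []
      · subst hxs
        simp only [List.map_cons, List.map_nil, List.sum_cons, List.sum_nil]
        have h1 : ¬ (([] : List Int) ≠ [] ∧ errors + pvC pattern xm y x + 0 > d) := by simp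
        have h2 : ¬ ((x :: ([] : List Int)) ≠ [] ∧ errors + (pvC pattern xm y x + 0) > d) := by
          simp only [ne_eq, List.cons_ne_nil, not_false_eq_true, true_and, not_lt]
          omega
        rw [if_neg h1, if_neg h2]
        congr 1
        ring
      · by_cases hbig : errors + pvC pattern xm y x + (xs.map (pvC pattern xm y)).sum > d
        · have c1 : xs ≠ [] ∧ errors + pvC pattern xm y x + (xs.map (pvC pattern xm y)).sum > d := ⟨hxs, hbig⟩
          have c2 : (x :: xs) ≠ [] ∧ errors + ((x :: xs).map (pvC pattern xm y)).sum > d := by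
            refine ⟨by simp, ?_⟩
            simp only [List.map_cons, List.sum_cons]; omega
          rw [if_pos c1, if_pos c2]
        · have c1 : ¬ (xs ≠ [] ∧ errors + pvC pattern xm y x + (xs.map (pvC pattern xm y)).sum > d) := by
            intro h; exact hbig h.2
          have c2 : ¬ ((x :: xs) ≠ [] ∧ errors + ((x :: xs).map (pvC pattern xm y)).sum > d) := by
            intro h
            apply hbig
            have := h.2
            simp only [List.map_cons, List.sum_cons] at this
            omega
          rw [if_neg c1, if_neg c2]
          simp only [List.map_cons, List.sum_cons]
          congr 1
          ring

lemma pvOuterA_eq (pattern : List (Int × Int)) (xm d : Int) (a b : Int) :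
    ∀ (ys : List Int) (errors : Int),
      pvOuterA pattern xm d (PySem.List.pyRange a b 1) ys errors
        = if PySem.List.pyRange a b 1 ≠ [] ∧ ys ≠ [] ∧
              errors + (ys.map (pvRow pattern xm a b)).sum > d then none
          else some (errors + (ys.map (pvRow pattern xm a b)).sum) := by
  intro ys
  induction ys with
  | nil => intro errors; simp [pvOuterA]
  | cons y ys ih =>
    intro errors
    have hrow : 0 ≤ pvRow pattern xm a b y := pvRow_nonneg _ _ _ _ _
    have hrest : 0 ≤ (ys.map (pvRow pattern xm a b)).sum := by
      refine List.sum_nonneg ?_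
      intro z hz
      obtain ⟨y', _, rfl⟩ := List.mem_map.1 hz
      exact pvRow_nonneg _ _ _ _ _
    show (match pvInnerA pattern xm d y (PySem.List.pyRange a b 1) errors with
      | none => none
      | some e => pvOuterA pattern xm d (PySem.List.pyRange a b 1) ys e) = _
    rw [pvInnerA_eq]
    have hrowdef : (((PySem.List.pyRange a b 1)).map (pvC pattern xm y)).sum = pvRow pattern xm a b y := rfl
    rw [hrowdef]
    by_cases hxr : PySem.List.pyRange a b 1 = []
    · have hrowe : pvRow pattern xm a b y = 0 := by
        unfold pvRow; rw [hxr]; simp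
      have h1 : ¬ ((PySem.List.pyRange a b 1) ≠ [] ∧ errors + pvRow pattern xm a b y > d) := by
        intro h; exact h.1 hxr
      rw [if_neg h1]
      show pvOuterA pattern xm d (PySem.List.pyRange a b 1) ys (errors + pvRow pattern xm a b y) = _
      rw [ih]
      have c1 : ¬ ((PySem.List.pyRange a b 1) ≠ [] ∧ ys ≠ [] ∧
          errors + pvRow pattern xm a b y + (ys.map (pvRow pattern xm a b)).sum > d) := by
        intro h; exact h.1 hxr
      have c2 : ¬ ((PySem.List.pyRange a b 1) ≠ [] ∧ (y :: ys) ≠ [] ∧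
          errors + ((y :: ys).map (pvRow pattern xm a b)).sum > d) := by
        intro h; exact h.1 hxr
      rw [if_neg c1, if_neg c2]
      simp only [List.map_cons, List.sum_cons]
      congr 1
      ring
    · by_cases hgt : errors + pvRow pattern xm a b y > d
      · rw [if_pos ⟨hxr, hgt⟩]
        have : (PySem.List.pyRange a b 1) ≠ [] ∧ (y :: ys) ≠ [] ∧
            errors + ((y :: ys).map (pvRow pattern xm a b)).sum > d := by
          refine ⟨hxr, by simp, ?_⟩
          simp only [List.map_cons, List.sum_cons]
          omega
        rw [if_pos this]
      · have hno : ¬ ((PySem.List.pyRange a b 1) ≠ [] ∧ errors + pvRow pattern xm a b y > d) := by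
          intro h; exact hgt h.2
        rw [if_neg hno]
        show pvOuterA pattern xm d (PySem.List.pyRange a b 1) ys (errors + pvRow pattern xm a b y) = _
        rw [ih]
        by_cases hbig : errors + pvRow pattern xm a b y + (ys.map (pvRow pattern xm a b)).sum > d
        · have hys : ys ≠ [] := by
            intro h; subst h; simp only [List.map_nil, List.sum_nil] at hbig; omega
          rw [if_pos ⟨hxr, hys, hbig⟩]
          have : (PySem.List.pyRange a b 1) ≠ [] ∧ (y :: ys) ≠ [] ∧
              errors + ((y :: ys).map (pvRow pattern xm a b)).sum > d := by
            refine ⟨hxr, by simp, ?_⟩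
            simp only [List.map_cons, List.sum_cons]; omega
          rw [if_pos this]
        · have c1 : ¬ ((PySem.List.pyRange a b 1) ≠ [] ∧ ys ≠ [] ∧
              errors + pvRow pattern xm a b y + (ys.map (pvRow pattern xm a b)).sum > d) := by
            intro h; exact hbig h.2.2
          have c2 : ¬ ((PySem.List.pyRange a b 1) ≠ [] ∧ (y :: ys) ≠ [] ∧
              errors + ((y :: ys).map (pvRow pattern xm a b)).sum > d) := by
            intro h
            apply hbig
            have := h.2.2
            simp only [List.map_cons, List.sum_cons] at this
            omega
          rw [if_neg c1, if_neg c2]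
          simp only [List.map_cons, List.sum_cons]
          congr 1
          ring

-- A's return value is: total error count equals desired_errors
lemma is_mirrored_x_char (pattern : List (Int × Int)) (mx my xm d : Int) :
    is_mirrored_x pattern mx my xm d
      = decide (pvTot pattern xm (max 0 (2 * xm - mx)) xm my = d) := by
  show (match pvOuterA pattern xm d
      (PySem.List.pyRange (max 0 (2 * xm - mx)) xm 1) (PySem.List.pyRange 0 my 1) 0 with
    | none => false
    | some errors => errors == d) = _
  rw [pvOuterA_eq]
  set a := max 0 (2 * xm - mx) with ha
  have htot : ((PySem.List.pyRange 0 my 1).map (pvRow pattern xm a xm)).sum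
      = pvTot pattern xm a xm my := rfl
  by_cases hc : (PySem.List.pyRange a xm 1) ≠ [] ∧ (PySem.List.pyRange 0 my 1) ≠ [] ∧
      (0 : Int) + ((PySem.List.pyRange 0 my 1).map (pvRow pattern xm a xm)).sum > d
  · rw [if_pos hc]
    have h2 := hc.2.2
    rw [htot] at h2
    have hne : pvTot pattern xm a xm my ≠ d := by omega
    show false = decide (pvTot pattern xm a xm my = d)
    simp [hne]
  · rw [if_neg hc]
    show ((0 : Int) + ((PySem.List.pyRange 0 my 1).map (pvRow pattern xm a xm)).sum == d) = _
    rw [zero_add, htot]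
    by_cases hh : pvTot pattern xm a xm my = d <;> simp [hh]

-- B's accumulator fold is a countP
lemma foldl_count (q : Int × Int → Bool) :
    ∀ (l : List (Int × Int)) (init : Int),
      l.foldl (fun e p => if q p then e + 1 else e) init = init + (l.countP q : Int) := by
  intro l
  induction l with
  | nil => intro init; simp
  | cons p l ih =>
    intro init
    simp only [List.foldl_cons, List.countP_cons]
    by_cases h : q p = true
    · rw [if_pos h, ih]; simp [h]; ring
    · rw [if_neg h, ih]; simp [h]

-- list sum over pyRange = Finset.Ico sum
lemma sum_map_pyRange_aux (f : Int → Int) (a : Int) :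
    ∀ n : ℕ, ((PySem.List.pyRange a (a + (n : Int)) 1).map f).sum = ∑ x ∈ Finset.Ico a (a + (n : Int)), f x := by
  intro n
  induction n with
  | zero =>
    rw [PySem.List.pyRange_one_eq_nil (by simp), Finset.Ico_eq_empty (by simp)]
    simp
  | succ k ih =>
    have hs : (a : Int) + ((k + 1 : ℕ) : Int) = (a + (k : ℕ)) + 1 := by push_cast; ring
    rw [hs, PySem.List.pyRange_one_succ_right (by omega : a ≤ a + ((k : ℕ) : Int)),
      ← Finset.insert_Ico_right_eq_Ico_add_one (by omega : a ≤ a + ((k : ℕ) : Int)),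
      Finset.sum_insert Finset.right_notMem_Ico, List.map_append, List.sum_append, ih]
    simp [add_comm]

lemma sum_map_pyRange (f : Int → Int) (a b : Int) :
    ((PySem.List.pyRange a b 1).map f).sum = ∑ x ∈ Finset.Ico a b, f x := by
  by_cases h : b ≤ a
  · rw [PySem.List.pyRange_one_eq_nil h, Finset.Ico_eq_empty (by omega)]
    simp
  · obtain ⟨n, hn⟩ : ∃ n : ℕ, b = a + (n : Int) := ⟨(b - a).toNat, by omega⟩
    subst hn
    exact sum_map_pyRange_aux f a n

-- cell condition used on the B side
def pvCond (pattern : List (Int × Int)) (xm mlo mhi my : Int) (p : Int × Int) : Bool :=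
  decide (0 ≤ p.2) && decide (p.2 < my) && decide (mlo ≤ p.1) && decide (p.1 < mhi)
    && !pattern.contains (2 * xm - p.1 - 1, p.2)

-- the per-cell indicator: occupied and mirror cell unoccupied
def pvInd (pattern : List (Int × Int)) (xm : Int) (p : Int × Int) : Int :=
  if pattern.contains p && !pattern.contains (2 * xm - p.1 - 1, p.2) then 1 else 0

lemma pvC_eq_ind (pattern : List (Int × Int)) (xm y x : Int) :
    pvC pattern xm y x = pvInd pattern xm (x, y) + pvInd pattern xm (2 * xm - x - 1, y) := by
  unfold pvC pvInd
  have hmm : 2 * xm - (2 * xm - x - 1) - 1 = x := by ring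
  simp only [hmm]
  cases h1 : pattern.contains (x, y) <;> cases h2 : pattern.contains (2 * xm - x - 1, y) <;> simp

lemma pvRow_band (pattern : List (Int × Int)) (xm a y : Int) (_ha : 0 ≤ a) :
    pvRow pattern xm a xm y = ∑ x ∈ Finset.Ico a (2 * xm - a), pvInd pattern xm (x, y) := by
  unfold pvRow
  rw [sum_map_pyRange]
  by_cases hx : a < xm
  · have hsum : ∑ x ∈ Finset.Ico a xm, pvC pattern xm y x
        = (∑ x ∈ Finset.Ico a xm, pvInd pattern xm (x, y))
          + ∑ x ∈ Finset.Ico a xm, pvInd pattern xm (2 * xm - x - 1, y) := by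
      rw [← Finset.sum_add_distrib]
      exact Finset.sum_congr rfl (fun x _ => pvC_eq_ind pattern xm y x)
    rw [hsum]
    have hbij : ∑ x ∈ Finset.Ico a xm, pvInd pattern xm (2 * xm - x - 1, y)
        = ∑ x ∈ Finset.Ico xm (2 * xm - a), pvInd pattern xm (x, y) := by
      refine Finset.sum_nbij' (fun x => 2 * xm - x - 1) (fun x => 2 * xm - x - 1) ?_ ?_ ?_ ?_ ?_
      · intro x hx'; simp only [Finset.mem_Ico] at hx' ⊢; omega
      · intro x hx'; simp only [Finset.mem_Ico] at hx' ⊢; omega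
      · intro x _; show 2 * xm - (2 * xm - x - 1) - 1 = x; ring
      · intro x _; show 2 * xm - (2 * xm - x - 1) - 1 = x; ring
      · intro x _; rfl
    rw [hbij]
    rw [← Finset.Ico_union_Ico_eq_Ico (by omega : a ≤ xm) (by omega : xm ≤ 2 * xm - a),
      Finset.sum_union (Finset.Ico_disjoint_Ico_consecutive a xm (2 * xm - a))]
  · rw [Finset.Ico_eq_empty (by omega), Finset.Ico_eq_empty (by omega)]
    simp

-- symmetric-form filters: over the band grid vs. over the pattern's distinct points
lemma pvTot_eq_card (pattern : List (Int × Int)) (xm a my : Int) (ha : 0 ≤ a) :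
    pvTot pattern xm a xm my
      = (((Finset.Ico a (2 * xm - a)) ×ˢ (Finset.Ico (0:Int) my)).filter
          (fun p => pattern.contains p && !pattern.contains (2 * xm - p.1 - 1, p.2))).card := by
  unfold pvTot
  rw [sum_map_pyRange]
  have h1 : ∀ y ∈ Finset.Ico (0:Int) my, pvRow pattern xm a xm y
      = ∑ x ∈ Finset.Ico a (2 * xm - a), pvInd pattern xm (x, y) :=
    fun y _ => pvRow_band pattern xm a y ha
  rw [Finset.sum_congr rfl h1, Finset.sum_comm]
  rw [← Finset.sum_product']
  unfold pvInd
  rw [Finset.sum_boole]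

lemma contains_iff_mem_toFinset (pattern : List (Int × Int)) (p : Int × Int) :
    pattern.contains p = true ↔ p ∈ pattern.toFinset := by
  rw [List.mem_toFinset]
  exact List.contains_iff_mem

lemma filter_swap (B S : Finset (Int × Int)) (q : Int × Int → Bool) :
    (B.filter (fun p => p ∈ S ∧ q p = true)).card
      = (S.filter (fun p => p ∈ B ∧ q p = true)).card := by
  congr 1
  ext p
  simp only [Finset.mem_filter]
  tauto

theorem pv_main (pattern : List (Int × Int)) (mx my xm d : Int) :
    is_mirrored_x pattern mx my xm d = is_mirrored_x_alt pattern mx my xm d := by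
  rw [is_mirrored_x_char]
  set a := max 0 (2 * xm - mx) with ha
  have ha0 : 0 ≤ a := le_max_left _ _
  show decide (pvTot pattern xm a xm my = d)
      = ((PySem.Set.ofList pattern).foldl
        (fun errors p =>
          if decide (0 ≤ p.2) && decide (p.2 < my) && decide (a ≤ p.1) && decide (p.1 < 2 * xm - a)
              && !pattern.contains (2 * xm - p.1 - 1, p.2)
          then errors + 1 else errors) (0 : Int) == d)
  rw [foldl_count]
  simp only [zero_add]
  congr 1
  rw [pvTot_eq_card pattern xm a my ha0]
  -- rewrite the band filter condition through pattern membership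
  have hB : (((Finset.Ico a (2 * xm - a)) ×ˢ (Finset.Ico (0:Int) my)).filter
        (fun p => pattern.contains p && !pattern.contains (2 * xm - p.1 - 1, p.2))).card
      = (((Finset.Ico a (2 * xm - a)) ×ˢ (Finset.Ico (0:Int) my)).filter
        (fun p => p ∈ pattern.toFinset ∧ (!pattern.contains (2 * xm - p.1 - 1, p.2)) = true)).card := by
    congr 1
    apply Finset.filter_congr
    intro p _
    simp only [Bool.and_eq_true, contains_iff_mem_toFinset]
  rw [hB, filter_swap]
  -- the B-side count
  have hnodup : (PySem.Set.ofList pattern).Nodup := PySem.Set.nodup_ofList pattern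
  have hmem : ∀ p, p ∈ PySem.Set.ofList pattern ↔ p ∈ pattern := fun p => PySem.Set.mem_ofList pattern p
  have hcount : ((PySem.Set.ofList pattern).countP
        (fun p => decide (0 ≤ p.2) && decide (p.2 < my) && decide (a ≤ p.1) && decide (p.1 < 2 * xm - a)
          && !pattern.contains (2 * xm - p.1 - 1, p.2)) : Int)
      = ((pattern.toFinset.filter
          (fun p => p ∈ ((Finset.Ico a (2 * xm - a)) ×ˢ (Finset.Ico (0:Int) my))
            ∧ (!pattern.contains (2 * xm - p.1 - 1, p.2)) = true)).card : Int) := by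
    congr 1
    rw [List.countP_eq_length_filter]
    have hfin : ((PySem.Set.ofList pattern).filter
        (fun p => decide (0 ≤ p.2) && decide (p.2 < my) && decide (a ≤ p.1) && decide (p.1 < 2 * xm - a)
          && !pattern.contains (2 * xm - p.1 - 1, p.2))).toFinset
        = pattern.toFinset.filter
          (fun p => p ∈ ((Finset.Ico a (2 * xm - a)) ×ˢ (Finset.Ico (0:Int) my))
            ∧ (!pattern.contains (2 * xm - p.1 - 1, p.2)) = true) := by
      ext p
      simp only [List.mem_toFinset, List.mem_filter, Finset.mem_filter, hmem,
        Finset.mem_product, Finset.mem_Ico, Bool.and_eq_true, decide_eq_true_eq]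
      tauto
    have hnd : ((PySem.Set.ofList pattern).filter
        (fun p => decide (0 ≤ p.2) && decide (p.2 < my) && decide (a ≤ p.1) && decide (p.1 < 2 * xm - a)
          && !pattern.contains (2 * xm - p.1 - 1, p.2))).Nodup := hnodup.filter _
    rw [← hfin, List.toFinset_card_of_nodup hnd]
  rw [← hcount]

-- ===== VERDICT (by name: the statement is the Claim_ definition above) =====
theorem is_mirrored_x_spec : Claim_equal_is_mirrored_x := by
  intro pattern mx my xm d _
  unfold Spec_is_mirrored_x
  exact pv_main pattern mx my xm d
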